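-- pv_equiv track=rewrite | github.com/stbech/calc2tex | calc2tex/helpers.py | search_char
-- ===== SOURCE A (Python) =====
-- def search_char(string: str, pos: int, chars: tuple) -> int:
--     """
--     Searches for the index of the next char out of the chars-list.
--
--     Parameters
--     ----------
--     string : str
--         A formula.
--     pos : int
--         The index, at which searching should be started.
--     chars : list
--         A list containing strings.
--
--     Returns
--     -------
--     int
--         The index of the next char or if there is no char found the lenght of the string.
--
--     """
--     indices = []
--     for char in chars:
--         #TODO nicht auf try-except statement verlassen -> char in string, dann string.index
--         try:
--             indices.append(string.index(char, pos))
--         except: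
--             pass
--
--     if indices == []:
--         return len(string)
--     else:
--         return min(indices)
-- ===== SOURCE B (Python) =====
-- def search_char(string: str, pos: int, chars: tuple) -> int:
--     for i in range(pos, len(string)):
--         if any(string.startswith(c, i) for c in chars):
--             return i
--     return len(string)
-- ===== Notes on version B (the rewrite author's own statement) =====
-- stated objective: simpler
-- what changed: Replaces A's k separate str.index scans collected into a list and reduced with min() by a single left-to-right position scan that returns the first index where any sought string starts; Pre_ restricts to the helper's natural domain of non-negative start positions, on which the scan is exact.
-- outside the precondition, e.g. on search_char('ab', -1, ('b',)): A returns 1, B returns -1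
import Mathlib
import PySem

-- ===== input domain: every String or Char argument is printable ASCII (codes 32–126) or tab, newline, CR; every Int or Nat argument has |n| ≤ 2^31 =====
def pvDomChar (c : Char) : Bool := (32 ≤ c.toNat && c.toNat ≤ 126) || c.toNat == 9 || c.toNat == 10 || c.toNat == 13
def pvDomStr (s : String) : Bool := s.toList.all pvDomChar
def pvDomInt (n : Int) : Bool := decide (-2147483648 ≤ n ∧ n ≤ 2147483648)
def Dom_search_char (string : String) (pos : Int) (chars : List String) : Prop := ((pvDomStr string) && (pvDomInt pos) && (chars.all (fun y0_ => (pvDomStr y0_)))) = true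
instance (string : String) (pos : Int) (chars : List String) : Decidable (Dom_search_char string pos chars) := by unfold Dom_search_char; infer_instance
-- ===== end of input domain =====

-- B replaces A's k separate str.index scans + min() by a single left-to-right scan that
-- returns the first position at which any of the sought strings starts (objective: simpler).

-- ===== PORT A =====
def search_char (string : String) (pos : Int) (chars : List String) : Int :=
  let indices : List Int :=
    chars.foldl (fun acc char =>
      if (PySem.Str.findFrom string char pos != -1) = true then
        acc ++ [PySem.Str.findFrom string char pos]
      else acc) []
  if indices = [] then PySem.Str.len string
  else (PySem.List.min? indices id).getD 0

-- ===== PORT B =====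
-- `string.startswith(c, i)`, ported by hand: Python clamps a negative start to max(0, len+i);
-- exact for i ≤ len(string), the only values B's loop produces.
def pyStartswithFrom (s : List Char) (c : List Char) (i : Int) : Bool :=
  PySem.Chars.startswith (s.drop (if i < 0 then max 0 ((s.length : Int) + i) else i).toNat) c

def search_char_alt (string : String) (pos : Int) (chars : List String) : Int :=
  let n : Int := PySem.Str.len string
  match (PySem.List.pyRange pos n 1).find? (fun i =>
      chars.any fun c => pyStartswithFrom string.toList c.toList i) with
  | some i => i
  | none => n

-- ===== PRECONDITION & SPEC =====
-- Pre_ restricts to the helper's natural domain of non-negative start positions; for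
-- negative pos A applies str.index's negative-start normalisation, a corner outside
-- the parser positions this helper is written for, and B's scan reports the position
-- as a negative index there.
def Pre_search_char (string : String) (pos : Int) (chars : List String) : Prop := 0 ≤ pos
instance (string : String) (pos : Int) (chars : List String) : Decidable (Pre_search_char string pos chars) := by unfold Pre_search_char; infer_instance
def pvWitness_search_char : String × Int × List String := ("a+b", 1, ["+", "-"])

def Spec_search_char (string : String) (pos : Int) (chars : List String) (out : Int) : Prop := out = search_char_alt string pos chars
instance (string : String) (pos : Int) (chars : List String) (out : Int) : Decidable (Spec_search_char string pos chars out) := by unfold Spec_search_char; infer_instance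

-- ===== CLAIM (what is proved, stated in full; the proofs are below) =====
def Claim_equal_search_char : Prop := ∀ (string : String) (pos : Int) (chars : List String), Dom_search_char string pos chars → Pre_search_char string pos chars → Spec_search_char string pos chars (search_char string pos chars)

-- ===== LEMMAS AND PROOFS =====

-- `s.find(sub, pos)` with the clamped start made explicit.
theorem findFrom_eval_gen (s sub : List Char) (pos : Int) :
    PySem.Chars.findFrom s sub pos none =
      (if (s.length : Int) < (if pos < 0 then max 0 (pos + s.length) else pos) then -1 else
        if PySem.Chars.find (s.drop (if pos < 0 then max 0 (pos + s.length) else pos).toNat) sub = -1 then -1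
        else (if pos < 0 then max 0 (pos + s.length) else pos) +
          PySem.Chars.find (s.drop (if pos < 0 then max 0 (pos + s.length) else pos).toNat) sub) := by
  simp only [PySem.Chars.findFrom, Int.toNat_natCast, List.take_length]
  by_cases h : pos < 0
  · by_cases h2 : pos + (s.length : Int) < 0
    · have e1 : max 0 (pos + (s.length : Int)) = 0 := by omega
      rw [e1] at *
      split_ifs <;> rfl
    · have e1 : max 0 (pos + (s.length : Int)) = pos + s.length := by omega
      rw [e1] at *
      split_ifs <;> rfl
  · split_ifs <;> rfl

-- the non-negative-start case used by the equivalence proof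
theorem findFrom_eval (s sub : List Char) (pos : Int) (hpos : 0 ≤ pos) :
    PySem.Chars.findFrom s sub pos none =
      (if (s.length : Int) < pos then -1 else
        if PySem.Chars.find (s.drop pos.toNat) sub = -1 then -1
        else pos + PySem.Chars.find (s.drop pos.toNat) sub) := by
  rw [findFrom_eval_gen]
  have e : (if pos < 0 then max 0 (pos + (s.length : Int)) else pos) = pos := by
    rw [if_neg (by omega)]
  rw [e]

theorem pyRange_one_nil {a b : Int} (h : b ≤ a) : PySem.List.pyRange a b 1 = [] := by
  simp [PySem.List.pyRange]
  omega

theorem find?_pyRange_none (p : Int → Bool) :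
    ∀ (k : Nat) (a b : Int), (b - a).toNat ≤ k → (∀ j, a ≤ j → j < b → p j = false) →
      (PySem.List.pyRange a b 1).find? p = none := by
  intro k
  induction k with
  | zero =>
    intro a b hk _
    rw [pyRange_one_nil (by omega)]
    rfl
  | succ k ih =>
    intro a b hk h
    by_cases hab : a < b
    · rw [PySem.List.pyRange_one_cons hab]
      rw [List.find?_cons_of_neg (by simp [h a le_rfl hab])]
      exact ih (a + 1) b (by omega) (fun j hj hjb => h j (by omega) hjb)
    · rw [pyRange_one_nil (by omega)]
      rfl

theorem find?_pyRange_some (p : Int → Bool) :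
    ∀ (k : Nat) (a b i : Int), (b - a).toNat ≤ k → a ≤ i → i < b → p i = true →
      (∀ j, a ≤ j → j < i → p j = false) →
      (PySem.List.pyRange a b 1).find? p = some i := by
  intro k
  induction k with
  | zero => intro a b i hk hai hib _ _; omega
  | succ k ih =>
    intro a b i hk hai hib hp hmin
    have hab : a < b := by omega
    rw [PySem.List.pyRange_one_cons hab]
    by_cases hia : i = a
    · subst hia
      exact List.find?_cons_of_pos hp
    · rw [List.find?_cons_of_neg (by simp [hmin a le_rfl (by omega)])]
      exact ih (a + 1) b i (by omega) (by omega) hib hp (fun j hj hjb => hmin j (by omega) hjb)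

-- a prefix of s.drop j (st ≤ j) is an infix of s.drop st
-- on a non-negative index the hand-ported startswith is plain startswith on the suffix
theorem pyStartswithFrom_nonneg (s c : List Char) (i : Int) (h : 0 ≤ i) :
    pyStartswithFrom s c i = PySem.Chars.startswith (s.drop i.toNat) c := by
  unfold pyStartswithFrom
  rw [if_neg (by omega)]

theorem infix_drop_of_prefix_drop {c s : List Char} {st j : Nat} (hstj : st ≤ j)
    (h : c <+: s.drop j) : c <:+: s.drop st := by
  have hj : j = st + (j - st) := by omega
  rw [hj, ← List.drop_drop] at h
  exact h.isInfix.trans (List.drop_suffix _ _).isInfix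

theorem search_char_eq (string : String) (pos : Int) (chars : List String) (hpos : 0 ≤ pos) :
    search_char string pos chars = search_char_alt string pos chars := by
  unfold search_char search_char_alt
  simp only [PySem.Str.findFrom_eq, PySem.Str.len_eq]
  set s : List Char := string.toList with hs
  have hst' : ∀ sub : List Char,
      PySem.Chars.findFrom s sub pos none =
        (if (s.length : Int) < pos then -1 else
          if PySem.Chars.find (s.drop pos.toNat) sub = -1 then -1
          else pos + PySem.Chars.find (s.drop pos.toNat) sub) :=
    fun sub => findFrom_eval s sub pos hpos
  rw [PySem.List.foldl_append_if
    (fun char => PySem.Chars.findFrom s char.toList pos none != -1)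
    (fun char => PySem.Chars.findFrom s char.toList pos none) chars []]
  simp only [List.nil_append]
  by_cases hbig : (s.length : Int) < pos
  · -- start past the end: every index() raises, A returns len; B's range is empty
    have hall : ∀ c : String, PySem.Chars.findFrom s c.toList pos none = -1 := by
      intro c; rw [hst' c.toList, if_pos hbig]
    have hfil : chars.filter (fun c => PySem.Chars.findFrom s c.toList pos none != -1) = [] := by
      apply List.filter_eq_nil_iff.mpr
      intro c _
      simp [hall c]
    rw [hfil]
    rw [pyRange_one_nil (by omega)]
    simp
  · rw [not_lt] at hbig
    -- per-char value through find on the suffix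
    have hchar : ∀ c : String, PySem.Chars.findFrom s c.toList pos none =
        (if PySem.Chars.find (s.drop pos.toNat) c.toList = -1 then -1
         else pos + PySem.Chars.find (s.drop pos.toNat) c.toList) := by
      intro c; rw [hst' c.toList, if_neg (by omega)]
    have hgpos : ∀ c : String, PySem.Chars.find (s.drop pos.toNat) c.toList ≠ -1 →
        0 ≤ PySem.Chars.find (s.drop pos.toNat) c.toList := by
      intro c hne
      have := PySem.Chars.neg_one_le_find (s.drop pos.toNat) c.toList
      omega
    have hfil : chars.filter (fun c => PySem.Chars.findFrom s c.toList pos none != -1)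
        = chars.filter (fun c => PySem.Chars.find (s.drop pos.toNat) c.toList != -1) := by
      apply List.filter_congr
      intro c _
      rw [hchar c]
      by_cases hc : PySem.Chars.find (s.drop pos.toNat) c.toList = -1
      · simp [hc]
      · have := hgpos c hc
        simp only [if_neg hc]
        have hne : pos + PySem.Chars.find (s.drop pos.toNat) c.toList ≠ -1 := by omega
        rw [Bool.eq_iff_iff]
        simp [bne_iff_ne, hne, hc]
    have hmap : (chars.filter (fun c => PySem.Chars.find (s.drop pos.toNat) c.toList != -1)).map
          (fun c => PySem.Chars.findFrom s c.toList pos none)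
        = (chars.filter (fun c => PySem.Chars.find (s.drop pos.toNat) c.toList != -1)).map
          (fun c => pos + PySem.Chars.find (s.drop pos.toNat) c.toList) := by
      apply List.map_congr_left
      intro c hc
      have hne := List.of_mem_filter hc
      simp only [bne_iff_ne, ne_eq] at hne
      rw [hchar c, if_neg hne]
    rw [hfil, hmap]
    have hdroplen : ((s.drop pos.toNat).length : Int) = (s.length : Int) - pos := by
      rw [List.length_drop]; omega
    by_cases hemp : chars.filter (fun c => PySem.Chars.find (s.drop pos.toNat) c.toList != -1) = []
    · -- no char occurs at or after pos: both return len(string)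
      have hnoq : ∀ j : Int, pos ≤ j → j < (s.length : Int) →
          (chars.any fun c => pyStartswithFrom s c.toList j) = false := by
        intro j hj hjn
        simp only [pyStartswithFrom_nonneg _ _ j (by omega)]
        rw [List.any_eq_false]
        intro c hc
        intro hsw
        have hpre : c.toList <+: s.drop j.toNat := (PySem.Chars.startswith_iff _ _).mp hsw
        have hinf : c.toList <:+: s.drop pos.toNat :=
          infix_drop_of_prefix_drop (by omega) hpre
        have : PySem.Chars.find (s.drop pos.toNat) c.toList ≠ -1 := by
          rw [ne_eq, PySem.Chars.find_eq_neg_one_iff]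
          exact not_not.mpr hinf
        have hmem : c ∈ chars.filter (fun c => PySem.Chars.find (s.drop pos.toNat) c.toList != -1) :=
          List.mem_filter.mpr ⟨hc, by simpa using this⟩
        rw [hemp] at hmem
        exact absurd hmem (List.not_mem_nil)
      rw [hemp]
      rw [find?_pyRange_none _ ((s.length : Int) - pos).toNat pos (s.length : Int) le_rfl hnoq]
      simp
    · -- some char occurs: A's min is B's first hit (or len when the only match is at the end)
      have hL : (chars.filter (fun c => PySem.Chars.find (s.drop pos.toNat) c.toList != -1)).map
          (fun c => pos + PySem.Chars.find (s.drop pos.toNat) c.toList) ≠ [] := by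
        simpa using hemp
      have hnn : PySem.List.min?
          ((chars.filter (fun c => PySem.Chars.find (s.drop pos.toNat) c.toList != -1)).map
            (fun c => pos + PySem.Chars.find (s.drop pos.toNat) c.toList)) id ≠ none := by
        simp only [ne_eq, PySem.List.min?_eq_none_iff]; exact hL
      obtain ⟨m, hm⟩ := Option.ne_none_iff_exists'.mp hnn
      obtain ⟨c0, hc0mem, hc0eq⟩ := List.mem_map.mp (PySem.List.min?_mem hm)
      have hc0chars : c0 ∈ chars := (List.mem_filter.mp hc0mem).1
      have hc0ne : PySem.Chars.find (s.drop pos.toNat) c0.toList ≠ -1 := by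
        have := (List.mem_filter.mp hc0mem).2; simpa using this
      have hc0pos : 0 ≤ PySem.Chars.find (s.drop pos.toNat) c0.toList := hgpos c0 hc0ne
      have hspec := PySem.Chars.find_spec (s := s.drop pos.toNat) (sub := c0.toList) hc0pos
      have hlen := PySem.Chars.find_le_length (s.drop pos.toNat) c0.toList
      have hmin := PySem.List.min?_isMin hm
      -- minimality of m over the scan positions: any hit at j forces m ≤ j
      have hhit : ∀ j : Int, pos ≤ j →
          (chars.any fun c => pyStartswithFrom s c.toList j) = true → m ≤ j := by
        intro j hj hany
        simp only [pyStartswithFrom_nonneg _ _ j (by omega)] at hany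
        obtain ⟨c', hc', hsw⟩ := List.any_eq_true.mp hany
        have hpre : c'.toList <+: s.drop j.toNat := (PySem.Chars.startswith_iff _ _).mp hsw
        have hinf : c'.toList <:+: s.drop pos.toNat :=
          infix_drop_of_prefix_drop (by omega) hpre
        have hne' : PySem.Chars.find (s.drop pos.toNat) c'.toList ≠ -1 := by
          rw [ne_eq, PySem.Chars.find_eq_neg_one_iff]
          exact not_not.mpr hinf
        have hpos' : 0 ≤ PySem.Chars.find (s.drop pos.toNat) c'.toList := hgpos c' hne'
        have hspec' := PySem.Chars.find_spec (s := s.drop pos.toNat) (sub := c'.toList) hpos'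
        have hle : pos + PySem.Chars.find (s.drop pos.toNat) c'.toList ≤ j := by
          by_contra hgt
          rw [not_le] at hgt
          have hlt : j.toNat - pos.toNat < (PySem.Chars.find (s.drop pos.toNat) c'.toList).toNat := by
            omega
          have hjsplit : j.toNat = pos.toNat + (j.toNat - pos.toNat) := by omega
          rw [hjsplit, ← List.drop_drop] at hpre
          exact hspec'.2 (j.toNat - pos.toNat) hlt hpre
        have hmem' : pos + PySem.Chars.find (s.drop pos.toNat) c'.toList ∈
            (chars.filter (fun c => PySem.Chars.find (s.drop pos.toNat) c.toList != -1)).map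
              (fun c => pos + PySem.Chars.find (s.drop pos.toNat) c.toList) :=
          List.mem_map.mpr ⟨c', List.mem_filter.mpr ⟨hc', by simpa using hne'⟩, rfl⟩
        have := hmin _ hmem'
        simp only [id] at this
        omega
      by_cases hmn : m < (s.length : Int)
      · -- the earliest match is before the end: B's scan stops exactly there
        have hfind : (PySem.List.pyRange pos (s.length : Int) 1).find?
            (fun i => chars.any fun c => pyStartswithFrom s c.toList i) = some m := by
          apply find?_pyRange_some _ (((s.length : Int) - pos).toNat) pos _ m le_rfl
          · omega
          · exact hmn
          · simp only [pyStartswithFrom_nonneg _ _ m (by omega)]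
            rw [List.any_eq_true]
            refine ⟨c0, hc0chars, ?_⟩
            rw [PySem.Chars.startswith_iff]
            have : m.toNat = pos.toNat + (PySem.Chars.find (s.drop pos.toNat) c0.toList).toNat := by
              omega
            rw [this, ← List.drop_drop]
            exact hspec.1
          · intro j hj hjm
            by_contra hq
            rw [Bool.not_eq_false] at hq
            have := hhit j hj hq
            omega
        rw [hfind, if_neg (by simpa using hL), hm]
        rfl
      · -- the only match is the empty string at the very end: both return len(string)
        have hmeq : m = (s.length : Int) := by omega
        have hnone : (PySem.List.pyRange pos (s.length : Int) 1).find?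
            (fun i => chars.any fun c => pyStartswithFrom s c.toList i) = none := by
          apply find?_pyRange_none _ (((s.length : Int) - pos).toNat) pos (s.length : Int) le_rfl
          intro j hj hjn
          by_contra hq
          rw [Bool.not_eq_false] at hq
          have := hhit j hj hq
          omega
        rw [hnone, if_neg (by simpa using hL), hm]
        simp [hmeq]

-- ===== VERDICT (by name: the statement is the Claim_ definition above) =====
theorem search_char_spec : Claim_equal_search_char := by
  intro string pos chars _ hpre
  unfold Spec_search_char
  exact search_char_eq string pos chars hpre
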